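-- pv_equiv track=rewrite | github.com/AlyaNovikova/Sketch-based-modeling | rendering1.py | is_part_of_skeleton
-- ===== SOURCE A (Python) =====
-- def is_part_of_skeleton(name, skeleton_bones, not_skeleton_bones):
--     for b in skeleton_bones:
--         if b in name:
--             flag = True
--             for nb in not_skeleton_bones:
--                 if nb in name:
--                     flag = False
--                     break
--             if flag:
--                 return True
--     return False
-- ===== SOURCE B (Python) =====
-- def is_part_of_skeleton(name, skeleton_bones, not_skeleton_bones):
--     return any(b in name for b in skeleton_bones) and \
--         not any(nb in name for nb in not_skeleton_bones)
-- ===== Notes on version B (the rewrite author's own statement) =====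
-- stated objective: faster
-- what changed: Replaces the nested loop (which re-scans the whole exclusion list for every matching skeleton bone) with two independent short-circuit any() scans combined by AND/NOT, valid because the exclusion test does not depend on the matching bone.
import Mathlib
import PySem

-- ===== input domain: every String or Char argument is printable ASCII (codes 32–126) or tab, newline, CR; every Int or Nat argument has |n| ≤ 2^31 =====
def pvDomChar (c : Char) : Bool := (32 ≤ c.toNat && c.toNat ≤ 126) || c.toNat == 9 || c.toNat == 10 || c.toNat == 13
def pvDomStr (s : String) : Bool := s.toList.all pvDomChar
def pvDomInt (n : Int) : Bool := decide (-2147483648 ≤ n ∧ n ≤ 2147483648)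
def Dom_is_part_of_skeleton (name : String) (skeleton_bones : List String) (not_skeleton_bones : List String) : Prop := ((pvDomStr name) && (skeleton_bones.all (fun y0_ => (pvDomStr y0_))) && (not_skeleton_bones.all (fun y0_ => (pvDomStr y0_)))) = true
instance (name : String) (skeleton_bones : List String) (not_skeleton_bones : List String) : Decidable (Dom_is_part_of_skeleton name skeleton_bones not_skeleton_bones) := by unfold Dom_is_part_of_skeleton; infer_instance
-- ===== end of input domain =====

-- B replaces A's nested loop by two independent short-circuit scans combined with AND/NOT (simpler).
-- ===== PORT A =====
-- inner 'for nb in not_skeleton_bones: if nb in name: flag = False; break' starting from flag = True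
def pvFlagLoop (name : String) (nbs : List String) : Bool :=
  match nbs with
  | [] => true
  | nb :: t => if PySem.Str.isIn nb name then false else pvFlagLoop name t

def is_part_of_skeleton (name : String) (skeleton_bones : List String) (not_skeleton_bones : List String) : Bool :=
  match skeleton_bones with
  | [] => false
  | b :: t =>
    if PySem.Str.isIn b name then
      (if pvFlagLoop name not_skeleton_bones then true
       else is_part_of_skeleton name t not_skeleton_bones)
    else is_part_of_skeleton name t not_skeleton_bones

-- ===== PORT B =====
def is_part_of_skeleton_alt (name : String) (skeleton_bones : List String) (not_skeleton_bones : List String) : Bool :=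
  (skeleton_bones.any (fun b => PySem.Str.isIn b name)) &&
    !(not_skeleton_bones.any (fun nb => PySem.Str.isIn nb name))

-- ===== PRECONDITION & SPEC =====
def Spec_is_part_of_skeleton (name : String) (skeleton_bones : List String) (not_skeleton_bones : List String) (out : Bool) : Prop := out = is_part_of_skeleton_alt name skeleton_bones not_skeleton_bones
instance (name : String) (skeleton_bones : List String) (not_skeleton_bones : List String) (out : Bool) : Decidable (Spec_is_part_of_skeleton name skeleton_bones not_skeleton_bones out) := by unfold Spec_is_part_of_skeleton; infer_instance

-- ===== CLAIM (what is proved, stated in full; the proofs are below) =====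
def Claim_equal_is_part_of_skeleton : Prop := ∀ (name : String) (skeleton_bones : List String) (not_skeleton_bones : List String), Dom_is_part_of_skeleton name skeleton_bones not_skeleton_bones → Spec_is_part_of_skeleton name skeleton_bones not_skeleton_bones (is_part_of_skeleton name skeleton_bones not_skeleton_bones)

-- ===== LEMMAS AND PROOFS =====
theorem pvFlagLoop_eq_not_any (name : String) (nbs : List String) :
    pvFlagLoop name nbs = !(nbs.any (fun nb => PySem.Str.isIn nb name)) := by
  induction nbs with
  | nil => rfl
  | cons nb t ih => simp [pvFlagLoop, List.any_cons, ih]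

theorem is_part_of_skeleton_eq_alt (name : String) (sb nbs : List String) :
    is_part_of_skeleton name sb nbs = is_part_of_skeleton_alt name sb nbs := by
  induction sb with
  | nil => rfl
  | cons b t ih =>
    simp only [is_part_of_skeleton, is_part_of_skeleton_alt, List.any_cons] at *
    rw [pvFlagLoop_eq_not_any]
    split_ifs with hb hf <;> simp_all

-- ===== VERDICT (by name: the statement is the Claim_ definition above) =====
theorem is_part_of_skeleton_spec : Claim_equal_is_part_of_skeleton := by
  intro name sb nbs _
  exact is_part_of_skeleton_eq_alt name sb nbs
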